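-- pv_equiv track=rewrite | github.com/benfolsom/LW_integrator | examples/validation/testbed_ui.py | _strip_driver_summary
-- ===== SOURCE A (Python) =====
-- from typing import Dict, List, Optional
--
-- def _strip_driver_summary(summary: str) -> str:
--     lines: List[str] = []
--     skipping = False
--     for line in summary.splitlines():
--         if line.startswith("- Driver"):
--             skipping = True
--             continue
--         if skipping:
--             if line.startswith("  driver"):
--                 continue
--             skipping = False
--         lines.append(line)
--     return "\n".join(lines)
-- ===== SOURCE B (Python) =====
-- def _strip_driver_summary(summary: str) -> str:
--     # Reverse pass: walk the lines back-to-front keeping a buffer `pend` of the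
--     # contiguous "  driver" lines just above the current position; a "- Driver"
--     # line discards that buffer (and itself), any other line flushes it as kept.
--     rev = []
--     pend = []
--     for line in reversed(summary.splitlines()):
--         if line.startswith("- Driver"):
--             pend = []
--         elif line.startswith("  driver"):
--             pend.append(line)
--         else:
--             rev.extend(pend)
--             pend = []
--             rev.append(line)
--     rev.extend(pend)
--     rev.reverse()
--     return "\n".join(rev)
-- ===== Notes on version B (the rewrite author's own statement) =====
-- stated objective: alternative
-- what changed: B traverses the lines in REVERSE, buffering each contiguous run of indented driver continuation lines and deciding whether to drop the buffer (when it meets the driver-summary marker line above it) or flush it as kept, then reverses the result, instead of A's forward pass carrying a boolean skip flag.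
import Mathlib
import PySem

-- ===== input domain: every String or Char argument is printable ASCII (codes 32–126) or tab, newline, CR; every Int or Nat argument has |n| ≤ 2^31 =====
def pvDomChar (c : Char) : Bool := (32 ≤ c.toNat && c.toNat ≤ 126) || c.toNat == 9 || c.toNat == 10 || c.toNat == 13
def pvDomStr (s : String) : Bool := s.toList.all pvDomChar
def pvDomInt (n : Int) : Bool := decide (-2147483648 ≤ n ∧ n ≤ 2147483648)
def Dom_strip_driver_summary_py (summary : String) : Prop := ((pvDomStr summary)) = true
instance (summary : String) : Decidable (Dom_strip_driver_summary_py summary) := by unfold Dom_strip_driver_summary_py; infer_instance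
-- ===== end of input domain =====

-- B replaces A's forward flag-carrying pass by a REVERSE traversal that buffers each
-- contiguous run of '  driver' lines and keeps or drops the buffer when it meets the
-- line above it (alternative decomposition, same O(n) cost).

-- ===== PORT A =====
-- A's for-loop over splitlines with the 'skipping' flag, as structural recursion over the lines
def pvAGo : List String → Bool → List String
  | [], _ => []
  | l :: rest, skipping =>
    if PySem.Str.startswith l "- Driver" then pvAGo rest true
    else if skipping then
      if PySem.Str.startswith l "  driver" then pvAGo rest true
      else l :: pvAGo rest false
    else l :: pvAGo rest false

def strip_driver_summary_py (summary : String) : String :=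
  PySem.Str.join "\n" (pvAGo (PySem.Str.splitlines summary) false)

-- ===== PORT B =====
-- one step of B's loop body over the state (rev, pend)
def pvBStep (st : List String × List String) (line : String) : List String × List String :=
  if PySem.Str.startswith line "- Driver" then (st.1, [])
  else if PySem.Str.startswith line "  driver" then (st.1, st.2 ++ [line])
  else (st.1 ++ st.2 ++ [line], [])

def strip_driver_summary_py_alt (summary : String) : String :=
  let st := (PySem.Str.splitlines summary).reverse.foldl pvBStep ([], [])
  PySem.Str.join "\n" ((st.1 ++ st.2).reverse)

-- ===== PRECONDITION & SPEC =====
def Spec_strip_driver_summary_py (summary : String) (out : String) : Prop := out = strip_driver_summary_py_alt summary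
instance (summary : String) (out : String) : Decidable (Spec_strip_driver_summary_py summary out) := by unfold Spec_strip_driver_summary_py; infer_instance

-- ===== CLAIM (what is proved, stated in full; the proofs are below) =====
def Claim_equal_strip_driver_summary_py : Prop := ∀ (summary : String), Dom_strip_driver_summary_py summary → Spec_strip_driver_summary_py summary (strip_driver_summary_py summary)

-- ===== LEMMAS AND PROOFS =====

-- the predicate B buffers on
def pvP (l : String) : Bool := PySem.Str.startswith l "  driver"

-- a line starting with "- Driver" cannot start with "  driver" (first char '-' vs ' ')
theorem pv_sw_disj (cs : List Char)
    (h : PySem.Chars.startswith cs ['-', ' ', 'D', 'r', 'i', 'v', 'e', 'r'] = true) :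
    PySem.Chars.startswith cs [' ', ' ', 'd', 'r', 'i', 'v', 'e', 'r'] = false := by
  rw [PySem.Chars.startswith_iff] at h
  by_contra hc
  rw [Bool.not_eq_false, PySem.Chars.startswith_iff] at hc
  cases cs with
  | nil => simp at h
  | cons c cs =>
    have h1 := (List.cons_prefix_cons.mp h).1
    have h2 := (List.cons_prefix_cons.mp hc).1
    rw [← h1] at h2
    exact absurd h2 (by decide)

-- the converse direction of the same disjointness
theorem pv_sw_disj' (cs : List Char)
    (h : PySem.Chars.startswith cs [' ', ' ', 'd', 'r', 'i', 'v', 'e', 'r'] = true) :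
    PySem.Chars.startswith cs ['-', ' ', 'D', 'r', 'i', 'v', 'e', 'r'] = false := by
  by_contra hc
  rw [Bool.not_eq_false] at hc
  exact absurd h (by simp [pv_sw_disj cs hc])

-- with skipping on, A drops exactly the leading run of '  driver' lines
theorem pvAGo_true (ls : List String) :
    pvAGo ls true = pvAGo (ls.dropWhile pvP) false := by
  induction ls with
  | nil => simp [pvAGo]
  | cons l rest ih =>
    by_cases hD : PySem.Chars.startswith l.toList ['-', ' ', 'D', 'r', 'i', 'v', 'e', 'r'] = true
    · have hp : pvP l = false := by simp [pvP, pv_sw_disj l.toList hD]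
      rw [List.dropWhile, hp]
      rw [pvAGo, pvAGo]
      simp [hD, ih]
    · by_cases hS : PySem.Chars.startswith l.toList [' ', ' ', 'd', 'r', 'i', 'v', 'e', 'r'] = true
      · have hp : pvP l = true := by simpa [pvP] using hS
        simp [pvAGo, List.dropWhile, hD, hS, hp, ih]
      · have hp : pvP l = false := by simpa [pvP] using hS
        simp [pvAGo, List.dropWhile, hD, hS, hp]

-- with skipping off, A keeps the leading run of '  driver' lines unchanged
theorem pvAGo_split (ls : List String) :
    pvAGo ls false = ls.takeWhile pvP ++ pvAGo (ls.dropWhile pvP) false := by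
  induction ls with
  | nil => simp [pvAGo]
  | cons l rest ih =>
    by_cases hS : pvP l = true
    · have hD : PySem.Chars.startswith l.toList ['-', ' ', 'D', 'r', 'i', 'v', 'e', 'r'] = false :=
        pv_sw_disj' l.toList (by simpa [pvP] using hS)
      simp [pvAGo, List.takeWhile, List.dropWhile, hD, hS, ih]
    · rw [Bool.not_eq_true] at hS
      simp [List.takeWhile, List.dropWhile, hS]

-- invariant of B's right-to-left accumulation
theorem pvB_invariant (ls : List String) :
    (ls.foldr (fun l st => pvBStep st l) ([], [])).2 = (ls.takeWhile pvP).reverse ∧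
    (ls.foldr (fun l st => pvBStep st l) ([], [])).1.reverse = pvAGo (ls.dropWhile pvP) false := by
  induction ls with
  | nil => simp [pvAGo]
  | cons l rest ih =>
    obtain ⟨ih1, ih2⟩ := ih
    rw [List.foldr_cons]
    generalize hst : List.foldr (fun l st => pvBStep st l) ([], []) rest = st at ih1 ih2
    by_cases hD : PySem.Chars.startswith l.toList ['-', ' ', 'D', 'r', 'i', 'v', 'e', 'r'] = true
    · have hp : pvP l = false := by simp [pvP, pv_sw_disj l.toList hD]
      refine ⟨by simp [pvBStep, List.takeWhile, hD, hp], ?_⟩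
      rw [List.dropWhile, hp]
      rw [pvAGo]
      simp [pvBStep, hD, pvAGo_true, ih2]
    · by_cases hS : PySem.Chars.startswith l.toList [' ', ' ', 'd', 'r', 'i', 'v', 'e', 'r'] = true
      · have hp : pvP l = true := by simpa [pvP] using hS
        refine ⟨?_, ?_⟩
        · simp [pvBStep, List.takeWhile, hD, hS, hp, ih1]
        · simp [pvBStep, List.dropWhile, hD, hS, hp, ih2]
      · have hp : pvP l = false := by simpa [pvP] using hS
        refine ⟨by simp [pvBStep, List.takeWhile, hD, hS, hp], ?_⟩
        rw [List.dropWhile, hp]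
        rw [pvAGo]
        simp [pvBStep, hD, hS, ih1]
        rw [pvAGo_split rest, ← ih2]

-- ===== VERDICT (by name: the statement is the Claim_ definition above) =====
theorem strip_driver_summary_py_spec : Claim_equal_strip_driver_summary_py := by
  intro summary _
  unfold Spec_strip_driver_summary_py strip_driver_summary_py strip_driver_summary_py_alt
  rw [List.foldl_reverse]
  have h := pvB_invariant (PySem.Str.splitlines summary)
  congr 1
  rw [List.reverse_append, h.1, h.2, List.reverse_reverse, pvAGo_split]
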